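-- pv_equiv track=rewrite | github.com/JuanCarlosVegaEsquivel/dmg-bot | bot.py | xp_to_level
-- ===== SOURCE A (Python) =====
-- def xp_to_level(xp, max_level=60):
--     """Convert skill XP to level using SkyBlock XP table."""
--     XP_TABLE = [
--         0, 50, 175, 375, 675, 1175, 1925, 2925, 4425, 6425,
--         9925, 14925, 22425, 32425, 47425, 67425, 97425, 147425,
--         222425, 322425, 522425, 822425, 1222425, 1722425, 2322425,
--         3022425, 3822425, 4722425, 5722425, 6822425, 8022425,
--         9322425, 10722425, 12222425, 13822425, 15522425, 17322425,
--         19222425, 21222425, 23322425, 25522425, 27822425, 30222425,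
--         32722425, 35322425, 38022425, 40822425, 43722425, 46722425,
--         49922425, 53222425, 56722425, 60322425, 64022425, 67822425,
--         71722425, 75722425, 79822425, 84022425, 88322425
--     ]
--     for i, req in enumerate(XP_TABLE):
--         if xp < req:
--             return max(0, i - 1)
--     return max_level
-- ===== SOURCE B (Python) =====
-- def xp_to_level(xp, max_level=60):
--     """Convert skill XP to level by consuming per-level XP increments."""
--     INCREMENTS = [
--         50, 125, 200, 300, 500, 750, 1000, 1500, 2000, 3500,
--         5000, 7500, 10000, 15000, 20000, 30000, 50000, 75000,
--         100000, 200000, 300000, 400000, 500000, 600000, 700000,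
--         800000, 900000, 1000000, 1100000, 1200000, 1300000,
--         1400000, 1500000, 1600000, 1700000, 1800000, 1900000,
--         2000000, 2100000, 2200000, 2300000, 2400000, 2500000,
--         2600000, 2700000, 2800000, 2900000, 3000000, 3200000,
--         3300000, 3500000, 3600000, 3700000, 3800000, 3900000,
--         4000000, 4100000, 4200000, 4300000
--     ]
--     rem = xp
--     level = 0
--     for inc in INCREMENTS:
--         if rem < inc:
--             return level
--         rem -= inc
--         level += 1
--     return max_level
-- ===== Notes on version B (the rewrite author's own statement) =====
-- stated objective: alternative
-- what changed: Instead of scanning absolute XP thresholds with an index, B stores the per-level XP increments (differences of the table) and consumes them from a remaining-XP accumulator, counting levels until the remainder is smaller than the next increment.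
import Mathlib
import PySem

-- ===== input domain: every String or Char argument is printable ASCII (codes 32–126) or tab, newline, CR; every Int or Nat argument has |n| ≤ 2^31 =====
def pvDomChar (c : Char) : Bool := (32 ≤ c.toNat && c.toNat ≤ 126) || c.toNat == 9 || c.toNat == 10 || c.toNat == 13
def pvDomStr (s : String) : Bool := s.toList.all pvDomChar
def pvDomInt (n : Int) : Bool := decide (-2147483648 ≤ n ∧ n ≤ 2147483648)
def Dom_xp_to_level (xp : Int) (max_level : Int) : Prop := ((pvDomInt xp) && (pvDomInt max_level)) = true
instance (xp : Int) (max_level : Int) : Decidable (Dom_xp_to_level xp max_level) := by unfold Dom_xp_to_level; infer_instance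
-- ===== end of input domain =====

-- B replaces A's indexed scan of absolute XP thresholds by consuming the per-level XP increments (table differences) from a remaining-XP accumulator; same thresholds, same result.


-- ===== PORT A =====
def xpTableA : List Int := [0, 50, 175, 375, 675, 1175, 1925, 2925, 4425, 6425, 9925, 14925, 22425, 32425, 47425, 67425, 97425, 147425, 222425, 322425, 522425, 822425, 1222425, 1722425, 2322425, 3022425, 3822425, 4722425, 5722425, 6822425, 8022425, 9322425, 10722425, 12222425, 13822425, 15522425, 17322425, 19222425, 21222425, 23322425, 25522425, 27822425, 30222425, 32722425, 35322425, 38022425, 40822425, 43722425, 46722425, 49922425, 53222425, 56722425, 60322425, 64022425, 67822425, 71722425, 75722425, 79822425, 84022425, 88322425]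

-- the 'for i, req in enumerate(XP_TABLE)' loop with early return
def xpLoopA (xp : Int) (max_level : Int) : List Int → Int → Int
  | [], _ => max_level
  | req :: rest, i => if xp < req then max 0 (i - 1) else xpLoopA xp max_level rest (i + 1)

def xp_to_level (xp : Int) (max_level : Int) : Int :=
  xpLoopA xp max_level xpTableA 0

-- ===== PORT B =====
def xpIncrements : List Int := [50, 125, 200, 300, 500, 750, 1000, 1500, 2000, 3500, 5000, 7500, 10000, 15000, 20000, 30000, 50000, 75000, 100000, 200000, 300000, 400000, 500000, 600000, 700000, 800000, 900000, 1000000, 1100000, 1200000, 1300000, 1400000, 1500000, 1600000, 1700000, 1800000, 1900000, 2000000, 2100000, 2200000, 2300000, 2400000, 2500000, 2600000, 2700000, 2800000, 2900000, 3000000, 3200000, 3300000, 3500000, 3600000, 3700000, 3800000, 3900000, 4000000, 4100000, 4200000, 4300000]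

-- Source B's 'for inc in INCREMENTS' loop: state (rem, level), early return of level
def xpConsume (max_level : Int) : List Int → Int → Int → Int
  | [], _, _ => max_level
  | inc :: incs, rem, level => if rem < inc then level else xpConsume max_level incs (rem - inc) (level + 1)

def xp_to_level_alt (xp : Int) (max_level : Int) : Int :=
  xpConsume max_level xpIncrements xp 0

-- ===== PRECONDITION & SPEC =====
def Spec_xp_to_level (xp : Int) (max_level : Int) (out : Int) : Prop := out = xp_to_level_alt xp max_level
instance (xp : Int) (max_level : Int) (out : Int) : Decidable (Spec_xp_to_level xp max_level out) := by unfold Spec_xp_to_level; infer_instance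

-- ===== CLAIM =====
def Claim_equal_xp_to_level : Prop := ∀ (xp : Int) (max_level : Int), Dom_xp_to_level xp max_level → Spec_xp_to_level xp max_level (xp_to_level xp max_level)

-- ===== LEMMAS AND PROOFS =====

-- partial sums of the increments starting above threshold `prev`
def cumsFrom (prev : Int) : List Int → List Int
  | [] => []
  | d :: ds => (prev + d) :: cumsFrom (prev + d) ds

-- lockstep: B's consuming loop equals A's scan over the partial sums, one index ahead
theorem consume_eq_loop (xp ml : Int) :
    ∀ (ds : List Int) (prev i : Int), 0 ≤ i →
      xpConsume ml ds (xp - prev) i = xpLoopA xp ml (cumsFrom prev ds) (i + 1) := by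
  intro ds
  induction ds with
  | nil => intro prev i _; simp [xpConsume, cumsFrom, xpLoopA]
  | cons d ds ih =>
    intro prev i hi
    simp only [xpConsume, cumsFrom, xpLoopA]
    by_cases h : xp - prev < d
    · rw [if_pos h, if_pos (by omega)]
      omega
    · rw [if_neg h, if_neg (by omega)]
      have := ih (prev + d) (i + 1) (by omega)
      rw [show xp - prev - d = xp - (prev + d) by ring, this]

theorem tableA_eq : xpTableA = 0 :: cumsFrom 0 xpIncrements := by decide

-- ===== VERDICT =====
theorem xp_to_level_spec : Claim_equal_xp_to_level := by
  intro xp ml _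
  unfold Spec_xp_to_level xp_to_level xp_to_level_alt
  rw [tableA_eq]
  simp only [xpLoopA]
  by_cases h0 : xp < 0
  · rw [if_pos h0]
    -- A returns max 0 (-1) = 0; B's first increment is 50 > xp, so B returns 0
    have : xpConsume ml xpIncrements xp 0 = 0 := by
      simp only [xpIncrements, xpConsume]
      rw [if_pos (by omega)]
    rw [this]
    rfl
  · rw [if_neg h0]
    have := consume_eq_loop xp ml xpIncrements 0 0 (le_refl 0)
    rw [show xp - 0 = xp by ring] at this
    rw [this]
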